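-- pv_equiv track=rewrite | github.com/LaylalaLau/17637-Assignments | wordish/views.py | _compute_color
-- ===== SOURCE A (Python) =====
-- def _compute_color(target, guess):
--     not_colored = dict()
--     color_list = []
--     for i in range(5):
--         not_colored[target[i]] = not_colored.get(target[i], 0) + 1
--     for i in range(5):
--         if target[i] == guess[i]:
--             not_colored[guess[i]] -= 1
--             color_list.append("green")
--         elif guess[i] in target:
--             left = not_colored[guess[i]]
--             counter = 0
--             for j in range(i, 5):
--                 if guess[j] == guess[i]:
--                     if guess[j] == target[j]:
--                         counter += 1
--             if left > counter:
--                 not_colored[guess[i]] -= 1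
--                 color_list.append("yellow")
--             else:
--                 color_list.append("gray")
--         else:
--             color_list.append("gray")
--     return color_list
-- ===== SOURCE B (Python) =====
-- def _compute_color(target, guess):
--     remaining = {}
--     for ch in target[:5]:
--         remaining[ch] = remaining.get(ch, 0) + 1
--     greens = []
--     for i in range(5):
--         if target[i] == guess[i]:
--             greens.append(True)
--             remaining[guess[i]] -= 1
--         else:
--             greens.append(False)
--     colors = []
--     for i in range(5):
--         if greens[i]:
--             colors.append("green")
--         elif remaining.get(guess[i], 0) > 0:
--             remaining[guess[i]] -= 1
--             colors.append("yellow")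
--         else:
--             colors.append("gray")
--     return colors
-- ===== Notes on version B (the rewrite author's own statement) =====
-- stated objective: simpler
-- what changed: Replaces A's inner lookahead j-loop and substring membership test with a two-pass scheme: first mark greens and decrement their counts, then a non-green position is yellow exactly when the letter's remaining count (via dict.get with default 0) is still positive.
import Mathlib
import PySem

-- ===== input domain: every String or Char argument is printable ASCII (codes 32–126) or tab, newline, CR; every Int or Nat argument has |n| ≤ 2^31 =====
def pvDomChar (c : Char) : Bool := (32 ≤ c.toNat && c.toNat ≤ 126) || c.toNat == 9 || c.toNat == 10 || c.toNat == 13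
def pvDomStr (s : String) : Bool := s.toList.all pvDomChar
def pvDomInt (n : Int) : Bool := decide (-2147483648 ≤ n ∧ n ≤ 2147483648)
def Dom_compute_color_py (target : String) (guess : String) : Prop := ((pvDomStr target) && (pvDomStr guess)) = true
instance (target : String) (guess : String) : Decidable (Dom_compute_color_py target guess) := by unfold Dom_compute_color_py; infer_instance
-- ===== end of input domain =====

-- B replaces A's inner lookahead j-loop with a two-pass count scheme (greens first, then yellows
-- by remaining count); simpler, same results wherever A returns (A's KeyError inputs excluded by Pre_).


-- ===== PORT A =====
-- inner j-loop body (outer index i): if guess[j]==guess[i]: if guess[j]==target[j]: counter += 1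
def aCounterStep (tl gl : List Char) (i : Int) (c : Int) (j : Int) : Int :=
  if PySem.List.pyGetD gl j ' ' = PySem.List.pyGetD gl i ' ' then
    (if PySem.List.pyGetD gl j ' ' = PySem.List.pyGetD tl j ' ' then c + 1 else c)
  else c
-- second-loop body; dict accesses ported with getD (Python raises KeyError where the key is
-- missing -- exactly the inputs Pre_ excludes)
def aStep (tl gl : List Char) (st : PySem.Dict Char Int × List String) (i : Int) :
    PySem.Dict Char Int × List String :=
  let ti := PySem.List.pyGetD tl i ' '
  let gi := PySem.List.pyGetD gl i ' '
  if ti = gi then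
    (st.1.insert gi (st.1.getD gi 0 - 1), st.2 ++ ["green"])
  else if PySem.Chars.isIn [gi] tl then
    let left := st.1.getD gi 0
    let counter := (PySem.List.pyRange i 5 1).foldl (aCounterStep tl gl i) 0
    if left > counter then (st.1.insert gi (st.1.getD gi 0 - 1), st.2 ++ ["yellow"])
    else (st.1, st.2 ++ ["gray"])
  else (st.1, st.2 ++ ["gray"])
def compute_color_py (target : String) (guess : String) : List String :=
  let tl := target.toList
  let gl := guess.toList
  let not_colored := (PySem.List.pyRange 0 5 1).foldl
    (fun d i => d.insert (PySem.List.pyGetD tl i ' ') (d.getD (PySem.List.pyGetD tl i ' ') 0 + 1))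
    PySem.Dict.empty
  ((PySem.List.pyRange 0 5 1).foldl (aStep tl gl) (not_colored, [])).2


-- ===== PORT B =====
-- pass 1: mark greens, decrement their counts
def bGreenStep (tl gl : List Char) (st : PySem.Dict Char Int × List Bool) (i : Int) :
    PySem.Dict Char Int × List Bool :=
  if PySem.List.pyGetD tl i ' ' = PySem.List.pyGetD gl i ' ' then
    (st.1.insert (PySem.List.pyGetD gl i ' ') (st.1.getD (PySem.List.pyGetD gl i ' ') 0 - 1),
     st.2 ++ [true])
  else (st.1, st.2 ++ [false])
-- pass 2: green positions stay green; otherwise yellow iff remaining.get(guess[i], 0) > 0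
def bColorStep (gl : List Char) (greens : List Bool) (st : PySem.Dict Char Int × List String)
    (i : Int) : PySem.Dict Char Int × List String :=
  let gi := PySem.List.pyGetD gl i ' '
  if PySem.List.pyGetD greens i false then (st.1, st.2 ++ ["green"])
  else if st.1.getD gi 0 > 0 then (st.1.insert gi (st.1.getD gi 0 - 1), st.2 ++ ["yellow"])
  else (st.1, st.2 ++ ["gray"])
def compute_color_py_alt (target : String) (guess : String) : List String :=
  let tl := target.toList
  let gl := guess.toList
  let remaining0 := (PySem.List.slice tl none (some 5)).foldl
      (fun d ch => d.insert ch (d.getD ch 0 + 1)) PySem.Dict.empty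
  let p := (PySem.List.pyRange 0 5 1).foldl (bGreenStep tl gl) (remaining0, [])
  ((PySem.List.pyRange 0 5 1).foldl (bColorStep gl p.2) (p.1, [])).2



-- ===== PRECONDITION & SPEC =====
-- Pre_ excludes exactly the inputs where Python A raises: strings shorter than 5 (IndexError) and
-- guesses with a letter, at a non-green position, occurring in target only at index ≥ 5 (KeyError).
def Pre_compute_color_py (target : String) (guess : String) : Prop :=
  5 ≤ target.toList.length ∧ 5 ≤ guess.toList.length ∧
  ∀ i : Nat, i < 5 →
    target.toList.getD i ' ' ≠ guess.toList.getD i ' ' →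
    guess.toList.getD i ' ' ∈ target.toList →
    guess.toList.getD i ' ' ∈ target.toList.take 5
instance (target : String) (guess : String) : Decidable (Pre_compute_color_py target guess) := by
  unfold Pre_compute_color_py; infer_instance

def pvWitness_compute_color_py : String × String := ("crane", "trace")

def Spec_compute_color_py (target : String) (guess : String) (out : List String) : Prop :=
  out = compute_color_py_alt target guess
instance (target : String) (guess : String) (out : List String) :
    Decidable (Spec_compute_color_py target guess out) := by
  unfold Spec_compute_color_py; infer_instance

-- ===== CLAIM (what is proved, stated in full; the proofs are below) =====
def Claim_equal_compute_color_py : Prop := ∀ (target : String) (guess : String), Dom_compute_color_py target guess → Pre_compute_color_py target guess → Spec_compute_color_py target guess (compute_color_py target guess)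

-- ===== LEMMAS AND PROOFS =====

def Gcnt (tl gl : List Char) (k : Int) (c : Char) : Int :=
  ((PySem.List.pyRange k 5 1).countP (fun j =>
    decide (PySem.List.pyGetD tl j ' ' = PySem.List.pyGetD gl j ' ') &&
    decide (PySem.List.pyGetD gl j ' ' = c)) : Int)
lemma Gcnt_nonneg (tl gl : List Char) (k : Int) (c : Char) : 0 ≤ Gcnt tl gl k c := by
  simp [Gcnt]
lemma Gcnt_nil (tl gl : List Char) (k : Int) (hk : 5 ≤ k) (c : Char) : Gcnt tl gl k c = 0 := by
  simp [Gcnt, PySem.List.pyRange_one_eq_nil hk]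
lemma Gcnt_cons (tl gl : List Char) (k : Int) (hk : k < 5) (c : Char) :
    Gcnt tl gl k c =
      (if PySem.List.pyGetD tl k ' ' = PySem.List.pyGetD gl k ' ' ∧
          PySem.List.pyGetD gl k ' ' = c then 1 else 0) + Gcnt tl gl (k + 1) c := by
  rw [Gcnt, PySem.List.pyRange_one_cons hk, List.countP_cons]
  by_cases h1 : PySem.List.pyGetD tl k ' ' = PySem.List.pyGetD gl k ' ' <;>
    by_cases h2 : PySem.List.pyGetD gl k ' ' = c <;>
      simp [Gcnt, h1, h2] <;> omega
lemma counter_eq (tl gl : List Char) (i : Int) :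
    (PySem.List.pyRange i 5 1).foldl (aCounterStep tl gl i) 0
      = Gcnt tl gl i (PySem.List.pyGetD gl i ' ') := by
  rw [PySem.List.foldl_congr_mem (PySem.List.pyRange i 5 1) (aCounterStep tl gl i)
    (fun acc j => if (PySem.List.pyGetD tl j ' ' = PySem.List.pyGetD gl j ' ' ∧
        PySem.List.pyGetD gl j ' ' = PySem.List.pyGetD gl i ' ') then acc + 1 else acc) 0 ?_,
    PySem.List.foldl_ite_add_one]
  · simp [Gcnt]
  · intro acc j _
    unfold aCounterStep
    by_cases h1 : PySem.List.pyGetD gl j ' ' = PySem.List.pyGetD gl i ' ' <;>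
      by_cases h2 : PySem.List.pyGetD gl j ' ' = PySem.List.pyGetD tl j ' ' <;>
        simp [h1, h2] <;> simp [eq_comm] at *
lemma map_pyGetD_take (tl : List Char) (h : 5 ≤ tl.length) :
    (PySem.List.pyRange 0 5 1).map (fun i => PySem.List.pyGetD tl i ' ') = tl.take 5 := by
  apply List.ext_getElem
  · simp [PySem.List.length_pyRange_one]; omega
  · intro n h1 h2
    simp only [List.getElem_map, List.getElem_take, PySem.List.getElem_pyRange_one]
    have h1' : n < 5 := by simpa [PySem.List.length_pyRange_one] using h1
    rw [show (0 : Int) + n = (n : Int) by omega]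
    simp [List.getD_eq_getElem?_getD, List.getElem?_eq_getElem (show n < tl.length by omega)]

-- dict-only form of the green pass
def bGreenD (tl gl : List Char) (d : PySem.Dict Char Int) (i : Int) : PySem.Dict Char Int :=
  if PySem.List.pyGetD tl i ' ' = PySem.List.pyGetD gl i ' ' then
    d.insert (PySem.List.pyGetD gl i ' ') (d.getD (PySem.List.pyGetD gl i ' ') 0 - 1)
  else d

lemma greenSplit (tl gl : List Char) (d : PySem.Dict Char Int) (bs : List Bool) :
    (PySem.List.pyRange 0 5 1).foldl (bGreenStep tl gl) (d, bs)
      = ((PySem.List.pyRange 0 5 1).foldl (bGreenD tl gl) d,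
         bs ++ (PySem.List.pyRange 0 5 1).map
           (fun i => decide (PySem.List.pyGetD tl i ' ' = PySem.List.pyGetD gl i ' '))) := by
  rw [PySem.List.foldl_congr_mem (PySem.List.pyRange 0 5 1) (bGreenStep tl gl)
    (fun s e => (bGreenD tl gl s.1 e,
      s.2 ++ [decide (PySem.List.pyGetD tl e ' ' = PySem.List.pyGetD gl e ' ')])) (d, bs) ?_,
    PySem.List.foldl_prod_mk (f := bGreenD tl gl)
      (g := fun bs i => bs ++ [decide (PySem.List.pyGetD tl i ' ' = PySem.List.pyGetD gl i ' ')]),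
    PySem.List.foldl_append_singleton_eq_map]
  · intro acc i _
    by_cases h : PySem.List.pyGetD tl i ' ' = PySem.List.pyGetD gl i ' ' <;>
      simp [bGreenStep, bGreenD, h]

lemma greenD_getD (tl gl : List Char) :
    ∀ (m : Nat) (k : Int), k + m = 5 → 0 ≤ k → ∀ (d : PySem.Dict Char Int) (c : Char),
    ((PySem.List.pyRange k 5 1).foldl (bGreenD tl gl) d).getD c 0
      = d.getD c 0 - Gcnt tl gl k c := by
  intro m
  induction m with
  | zero =>
    intro k hk _ d c
    rw [PySem.List.pyRange_one_eq_nil (by omega), Gcnt_nil tl gl k (by omega)]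
    simp
  | succ m ih =>
    intro k hk hk0 d c
    rw [PySem.List.pyRange_one_cons (by omega), List.foldl_cons,
      ih (k + 1) (by omega) (by omega), Gcnt_cons tl gl k (by omega)]
    by_cases hg : PySem.List.pyGetD tl k ' ' = PySem.List.pyGetD gl k ' '
    · by_cases hc : PySem.List.pyGetD gl k ' ' = c
      · simp [bGreenD, hg, hc]; omega
      · simp [bGreenD, hg, hc, PySem.Dict.getD_insert, Ne.symm hc]
    · simp [bGreenD, hg]

lemma main_loop (tl gl : List Char) :
    ∀ (m : Nat) (k : Int), k + m = 5 → 0 ≤ k →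
    ∀ (dA dB : PySem.Dict Char Int) (acc : List String),
    (∀ c, dA.getD c 0 = dB.getD c 0 + Gcnt tl gl k c) →
    (∀ c, c ∉ tl → dB.getD c 0 ≤ 0) →
    ((PySem.List.pyRange k 5 1).foldl (aStep tl gl) (dA, acc)).2
      = ((PySem.List.pyRange k 5 1).foldl
          (bColorStep gl ((PySem.List.pyRange 0 5 1).map
            (fun i => decide (PySem.List.pyGetD tl i ' ' = PySem.List.pyGetD gl i ' '))))
          (dB, acc)).2 := by
  intro m
  induction m with
  | zero =>
    intro k hk _ dA dB acc _ _
    rw [PySem.List.pyRange_one_eq_nil (by omega)]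
    rfl
  | succ m ih =>
    intro k hk hk0 dA dB acc H1 H2
    rw [PySem.List.pyRange_one_cons (by omega), List.foldl_cons, List.foldl_cons]
    have hgr : PySem.List.pyGetD ((PySem.List.pyRange 0 5 1).map
        (fun i => decide (PySem.List.pyGetD tl i ' ' = PySem.List.pyGetD gl i ' '))) k false
        = decide (PySem.List.pyGetD tl k ' ' = PySem.List.pyGetD gl k ' ') :=
      PySem.List.pyGetD_map_pyRange_of_nonneg _ 5 k false hk0 (by omega)
    set grs := (PySem.List.pyRange 0 5 1).map
      (fun i => decide (PySem.List.pyGetD tl i ' ' = PySem.List.pyGetD gl i ' ')) with hgrs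
    set tk := PySem.List.pyGetD tl k ' ' with htk
    set gk := PySem.List.pyGetD gl k ' ' with hgk
    by_cases hg : tk = gk
    · -- green at k
      have hA : aStep tl gl (dA, acc) k
          = (dA.insert gk (dA.getD gk 0 - 1), acc ++ ["green"]) := by
        simp [aStep, ← htk, ← hgk, hg]
      have hB : bColorStep gl grs (dB, acc) k = (dB, acc ++ ["green"]) := by
        simp [bColorStep, hgr, hg]
      rw [hA, hB]
      apply ih (k + 1) (by omega) (by omega)
      · intro c
        rw [PySem.Dict.getD_insert]
        have := H1 c
        rw [Gcnt_cons tl gl k (by omega)] at this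
        by_cases hc : c = gk
        · subst hc
          have h2 := H1 gk
          rw [Gcnt_cons tl gl k (by omega)] at h2
          simp [← htk, ← hgk, hg] at h2 ⊢
          omega
        · have hne : ¬ (tk = gk ∧ gk = c) := by intro h; exact hc h.2.symm
          rw [if_neg hne] at this
          rw [if_neg hc]
          omega
      · exact H2
    · -- not green at k
      have hGstep : ∀ c, Gcnt tl gl k c = Gcnt tl gl (k + 1) c := by
        intro c
        rw [Gcnt_cons tl gl k (by omega)]
        have : ¬ (tk = gk ∧ gk = c) := by intro h; exact hg h.1
        simp [← htk, ← hgk, this]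
      by_cases hm : gk ∈ tl
      · have hmem : PySem.Chars.isIn [gk] tl = true := by
          rw [PySem.Chars.isIn_iff_infix]
          exact (List.singleton_infix_iff gk tl).mpr hm
        have hcnt : (PySem.List.pyRange k 5 1).foldl (aCounterStep tl gl k) 0
            = Gcnt tl gl k gk := counter_eq tl gl k
        by_cases hy : dB.getD gk 0 > 0
        · have hleft : dA.getD gk 0 > Gcnt tl gl k gk := by
            have := H1 gk; omega
          have hA : aStep tl gl (dA, acc) k
              = (dA.insert gk (dA.getD gk 0 - 1), acc ++ ["yellow"]) := by
            simp [aStep, ← htk, ← hgk, hg, hmem, hcnt, hleft]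
          have hB : bColorStep gl grs (dB, acc) k
              = (dB.insert gk (dB.getD gk 0 - 1), acc ++ ["yellow"]) := by
            simp [bColorStep, hgr, ← hgk, hg, hy]
          rw [hA, hB]
          apply ih (k + 1) (by omega) (by omega)
          · intro c
            rw [PySem.Dict.getD_insert, PySem.Dict.getD_insert, ← hGstep c]
            by_cases hc : c = gk <;> simp [hc] <;> [skip; exact H1 c]
            have := H1 gk; omega
          · intro c hcm
            rw [PySem.Dict.getD_insert]
            by_cases hc : c = gk
            · subst hc; exact absurd hm hcm
            · simp [hc]; exact H2 c hcm
        · have hleft : ¬ (dA.getD gk 0 > Gcnt tl gl k gk) := by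
            have := H1 gk; omega
          have hA : aStep tl gl (dA, acc) k = (dA, acc ++ ["gray"]) := by
            simp [aStep, ← htk, ← hgk, hg, hmem, hcnt, hleft]
          have hB : bColorStep gl grs (dB, acc) k = (dB, acc ++ ["gray"]) := by
            simp [bColorStep, hgr, ← hgk, hg, hy]
          rw [hA, hB]
          apply ih (k + 1) (by omega) (by omega)
          · intro c; rw [← hGstep c]; exact H1 c
          · exact H2
      · have hmem : ¬ PySem.Chars.isIn [gk] tl = true := by
          rw [PySem.Chars.isIn_iff_infix]
          intro h; exact hm ((List.singleton_infix_iff gk tl).mp h)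
        have hy : ¬ dB.getD gk 0 > 0 := by have := H2 gk hm; omega
        have hA : aStep tl gl (dA, acc) k = (dA, acc ++ ["gray"]) := by
          simp [aStep, ← htk, ← hgk, hg, hmem]
        have hB : bColorStep gl grs (dB, acc) k = (dB, acc ++ ["gray"]) := by
          simp [bColorStep, hgr, ← hgk, hg, hy]
        rw [hA, hB]
        apply ih (k + 1) (by omega) (by omega)
        · intro c; rw [← hGstep c]; exact H1 c
        · exact H2

lemma key (tl gl : List Char) (hlt : 5 ≤ tl.length) :
    ((PySem.List.pyRange 0 5 1).foldl (aStep tl gl)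
      ((PySem.List.pyRange 0 5 1).foldl
        (fun d i => d.insert (PySem.List.pyGetD tl i ' ')
          (d.getD (PySem.List.pyGetD tl i ' ') 0 + 1)) PySem.Dict.empty, [])).2
    = ((PySem.List.pyRange 0 5 1).foldl
        (bColorStep gl ((PySem.List.pyRange 0 5 1).foldl (bGreenStep tl gl)
          ((PySem.List.slice tl none (some 5)).foldl
            (fun d ch => d.insert ch (d.getD ch 0 + 1)) PySem.Dict.empty, [])).2)
        (((PySem.List.pyRange 0 5 1).foldl (bGreenStep tl gl)
          ((PySem.List.slice tl none (some 5)).foldl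
            (fun d ch => d.insert ch (d.getD ch 0 + 1)) PySem.Dict.empty, [])).1, [])).2 := by
  have hslice : PySem.List.slice tl none (some 5) = tl.take 5 := by
    rw [PySem.List.slice_to (xs := tl) (b := 5) (by norm_num)]
    simp
  rw [hslice, greenSplit, List.nil_append]
  have hA : ∀ c, ((PySem.List.pyRange 0 5 1).foldl
      (fun d i => d.insert (PySem.List.pyGetD tl i ' ')
        (d.getD (PySem.List.pyGetD tl i ' ') 0 + 1)) PySem.Dict.empty).getD c 0
      = ((tl.take 5).count c : Int) := by
    intro c
    rw [← map_pyGetD_take tl hlt,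
      ← List.foldl_map (f := fun i => PySem.List.pyGetD tl i ' ')
        (g := fun (d : PySem.Dict Char Int) x => d.insert x (d.getD x 0 + 1))
        (l := PySem.List.pyRange 0 5 1) (init := PySem.Dict.empty),
      PySem.Dict.getD_foldl_insert_add_one]
    simp
  apply main_loop tl gl 5 0 (by norm_num) (by norm_num)
  · intro c
    rw [hA c, greenD_getD tl gl 5 0 (by norm_num) (by norm_num),
      PySem.Dict.getD_foldl_insert_add_one]
    simp
  · intro c hcm
    rw [greenD_getD tl gl 5 0 (by norm_num) (by norm_num),
      PySem.Dict.getD_foldl_insert_add_one]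
    have hc0 : (tl.take 5).count c = 0 :=
      List.count_eq_zero.mpr (fun h => hcm (List.mem_of_mem_take h))
    have := Gcnt_nonneg tl gl 0 c
    simp [hc0, PySem.Dict.getD_empty]
    omega


-- ===== VERDICT =====
theorem compute_color_py_spec : Claim_equal_compute_color_py := by
  intro target guess _ hpre
  unfold Spec_compute_color_py
  simp only [compute_color_py, compute_color_py_alt]
  exact key target.toList guess.toList hpre.1
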